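-- pv_equiv track=rewrite | github.com/tlgs/aoc-2023 | 07.py | part_two
-- ===== SOURCE A (Python) =====
-- from collections import Counter
--
-- def run(hands, key):
--     ranked = sorted(hands, key=key)
--     return sum(rank * int(bid) for rank, (_, bid) in enumerate(ranked, start=1))
--
-- def part_two(hands):
--     def f(hand):
--         cards, _ = hand
--
--         signature = tuple(sorted(Counter(c for c in cards if c != "J").values()))
--         match signature:
--             case (5,) | (4,) | (3,) | (2,) | (1,) | ():
--                 kind = 6
--             case (1, 4) | (1, 3) | (1, 2) | (1, 1):
--                 kind = 5
--             case (2, 3) | (2, 2):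
--                 kind = 4
--             case (1, 1, 3) | (1, 1, 2) | (1, 1, 1):
--                 kind = 3
--             case (1, 2, 2):
--                 kind = 2
--             case (1, 1, 1, 2) | (1, 1, 1, 1):
--                 kind = 1
--             case (1, 1, 1, 1, 1):
--                 kind = 0
--             case t:
--                 raise ValueError(t)
--
--         ordering = ["J", "2", "3", "4", "5", "6", "7", "8", "9", "T", "Q", "K", "A"]
--         strengths = tuple(map(ordering.index, cards))
--
--         return (kind, *strengths)
--
--     return run(hands, f)
-- ===== SOURCE B (Python) =====
-- from collections import Counter
--
-- ORDER = "J23456789TQKA"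
-- STRENGTH = {c: i for i, c in enumerate(ORDER)}
-- KIND = {
--     (5,): 6,
--     (1, 4): 5,
--     (2, 3): 4,
--     (1, 1, 3): 3,
--     (1, 2, 2): 2,
--     (1, 1, 1, 2): 1,
--     (1, 1, 1, 1, 1): 0,
-- }
--
-- def part_two(hands):
--     def key(cards):
--         counts = sorted(Counter(c for c in cards if c != "J").values())
--         # wildcards to hand out: whatever is missing from a full hand of 5
--         wild = 5 - sum(counts)
--         counts = counts[:-1] + [counts[-1] + wild] if counts else [5]
--         return [KIND[tuple(counts)]] + [STRENGTH[c] for c in cards]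
--
--     # No sort: a hand's rank in the stable ordering is 1 + (#hands with a
--     # strictly smaller key) + (#earlier hands with an equal key).
--     keys = [key(cards) for cards, _ in hands]
--     total = 0
--     seen = []
--     for (_, bid), k in zip(hands, keys):
--         rank = 1 + sum(kk < k for kk in keys) + sum(kk == k for kk in seen)
--         total += rank * int(bid)
--         seen.append(k)
--     return total
-- ===== Notes on version B (the rewrite author's own statement) =====
-- stated objective: alternative
-- what changed: B eliminates the sort entirely: it computes each hand's rank directly as 1 + (#hands with a strictly smaller key) + (#earlier hands with an equal key) -- the position a stable sort would give it -- and accumulates rank*bid in one pass over the original order; the hand type comes from a joker-absorbing 7-entry table instead of A's 18-pattern match, trading O(n log n) sorting for O(n^2) pairwise comparisons.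
import Mathlib
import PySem

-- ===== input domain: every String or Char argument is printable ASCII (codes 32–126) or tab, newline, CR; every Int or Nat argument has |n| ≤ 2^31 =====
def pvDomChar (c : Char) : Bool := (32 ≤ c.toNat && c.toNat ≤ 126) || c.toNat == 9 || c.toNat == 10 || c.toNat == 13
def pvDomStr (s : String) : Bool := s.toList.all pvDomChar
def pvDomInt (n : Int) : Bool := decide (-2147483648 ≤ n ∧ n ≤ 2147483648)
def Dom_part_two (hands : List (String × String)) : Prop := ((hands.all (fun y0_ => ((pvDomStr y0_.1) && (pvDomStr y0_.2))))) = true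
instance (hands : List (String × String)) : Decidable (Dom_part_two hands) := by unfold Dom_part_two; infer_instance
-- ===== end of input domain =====

-- B removes the sort: each hand's rank is counted directly as 1 + #strictly-smaller keys +
-- #earlier equal keys (its stable-sort position), accumulated in one pass (objective: alternative).

-- ===== PORT A =====
-- ordering = ["J", "2", …, "A"]
def orderingA : List Char := ['J', '2', '3', '4', '5', '6', '7', '8', '9', 'T', 'Q', 'K', 'A']

-- the `match signature` block of A's f; `none` = the `raise ValueError(t)` arm
def kindA (sig : List Int) : Option Int :=
  if sig = [5] ∨ sig = [4] ∨ sig = [3] ∨ sig = [2] ∨ sig = [1] ∨ sig = [] then some 6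
  else if sig = [1, 4] ∨ sig = [1, 3] ∨ sig = [1, 2] ∨ sig = [1, 1] then some 5
  else if sig = [2, 3] ∨ sig = [2, 2] then some 4
  else if sig = [1, 1, 3] ∨ sig = [1, 1, 2] ∨ sig = [1, 1, 1] then some 3
  else if sig = [1, 2, 2] then some 2
  else if sig = [1, 1, 1, 2] ∨ sig = [1, 1, 1, 1] then some 1
  else if sig = [1, 1, 1, 1, 1] then some 0
  else none

-- A's f; `none` = an exception (ValueError from the match or from ordering.index)
def keyA (cards : String) : Option (List Int) :=
  let sig := PySem.List.sorted ((PySem.Dict.counter (cards.toList.filter (fun c => c != 'J'))).values) (fun x => x) false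
  match kindA sig, cards.toList.mapM (fun c => (PySem.List.index? orderingA c).map (fun n => (n : Int))) with
  | some kind, some strengths => some (kind :: strengths)
  | _, _ => none

-- run(hands, f): sorted + enumerate sum; the `if` only makes the exceptional inputs total (Pre_ excludes them)
def part_two (hands : List (String × String)) : Int :=
  if hands.all (fun h => (keyA h.1).isSome && (PySem.Int.ofStr? h.2).isSome) then
    let ranked := PySem.List.sorted hands (fun h => (keyA h.1).getD []) false
    ((PySem.List.enumerate ranked 1).map (fun p => p.1 * ((PySem.Int.ofStr? p.2.2).getD 0))).sum
  else 0

-- ===== PORT B =====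
-- STRENGTH = {c: i for i, c in enumerate(ORDER)}
def strengthB : PySem.Dict Char Int :=
  (PySem.List.enumerate "J23456789TQKA".toList 0).foldl (fun d p => d.insert p.2 p.1) PySem.Dict.empty

-- KIND = {(5,): 6, …}; `none` = KeyError
def kindB : PySem.Dict (List Int) Int :=
  ((((((PySem.Dict.empty.insert [5] 6).insert [1, 4] 5).insert [2, 3] 4).insert
      [1, 1, 3] 3).insert [1, 2, 2] 2).insert [1, 1, 1, 2] 1).insert [1, 1, 1, 1, 1] 0

-- B's key; `none` = a KeyError in KIND[…] or STRENGTH[c]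
def keyB (cards : String) : Option (List Int) :=
  let counts := PySem.List.sorted ((PySem.Dict.counter (cards.toList.filter (fun c => c != 'J'))).values) (fun x => x) false
  let wild : Int := 5 - counts.sum
  let counts := if counts = [] then [5]
    else PySem.List.slice counts none (some (-1)) ++ [(PySem.List.pyGet? counts (-1)).getD 0 + wild]
  match kindB.get? counts, cards.toList.mapM (fun c => strengthB.get? c) with
  | some kind, some strengths => some (kind :: strengths)
  | _, _ => none

-- keys = [key(cards) …]; then one pass: rank = 1 + sum(kk < k for kk in keys) + sum(kk == k for kk in seen)
def part_two_alt (hands : List (String × String)) : Int :=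
  if hands.all (fun h => (keyB h.1).isSome && (PySem.Int.ofStr? h.2).isSome) then
    let ks := hands.map (fun h => (keyB h.1).getD [])
    ((hands.zip ks).foldl (fun st p =>
        (st.1 ++ [p.2],
         st.2 + (1 + ((ks.countP (fun kk => decide (kk < p.2)) : Int))
                   + ((st.1.countP (fun kk => decide (kk = p.2)) : Int)))
              * ((PySem.Int.ofStr? p.1.2).getD 0)))
      (([], 0) : List (List Int) × Int)).2
  else 0

-- ===== PRECONDITION & SPEC =====
-- Pre_ is exactly where A returns: cards drawn from the 13 ranks, at most 5 non-joker cards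
-- (A's match covers every partition of 0..5 and raises ValueError beyond), and an int-parsable bid.
def Pre_part_two (hands : List (String × String)) : Prop :=
  (hands.all (fun h => decide ((h.1.toList.filter (fun c => c != 'J')).length ≤ 5)
      && h.1.toList.all (fun c => orderingA.contains c)
      && (PySem.Int.ofStr? h.2).isSome)) = true
instance (hands : List (String × String)) : Decidable (Pre_part_two hands) := by unfold Pre_part_two; infer_instance

def pvWitness_part_two : (List (String × String)) :=
  [("32T3K", "765"), ("T55J5", "684"), ("KK677", "28"), ("KTJJT", "220"), ("QQQJA", "483")]

def Spec_part_two (hands : List (String × String)) (out : Int) : Prop := out = part_two_alt hands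
instance (hands : List (String × String)) (out : Int) : Decidable (Spec_part_two hands out) := by unfold Spec_part_two; infer_instance

-- ===== CLAIM (what is proved, stated in full; the proofs are below) =====
def Claim_equal_part_two : Prop := ∀ (hands : List (String × String)), Dom_part_two hands → Pre_part_two hands → Spec_part_two hands (part_two hands)

-- ===== LEMMAS AND PROOFS =====

-- each element of a list of ints ≥ 1 bounds its length by its sum
lemma len_le_sum_of_one_le (l : List Int) (h : ∀ x ∈ l, 1 ≤ x) : (l.length : Int) ≤ l.sum := by
  induction l with
  | nil => simp
  | cons a t ih =>
    have ha := h a (by simp)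
    have := ih (fun x hx => h x (by simp [hx]))
    simp only [List.length_cons, List.sum_cons]
    push_cast
    omega

-- the combinatorial heart: on a sorted positive signature summing to 5 - j, A's match and
-- B's joker-absorbing table lookup agree (and A's match does not raise)
lemma kind_agree (sig : List Int) (j : Int) (hp : ∀ x ∈ sig, 1 ≤ x)
    (hs : sig.Pairwise (· ≤ ·)) (hj : 0 ≤ j) (hsum : sig.sum + j = 5) :
    kindA sig = kindB.get? (if sig = [] then [5]
        else PySem.List.slice sig none (some (-1)) ++ [(PySem.List.pyGet? sig (-1)).getD 0 + j])
      ∧ (kindA sig).isSome = true := by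
  obtain rfl : j = 5 - sig.sum := by omega
  rcases sig with _ | ⟨a, _ | ⟨b, _ | ⟨c, _ | ⟨d, _ | ⟨e, _ | ⟨f, rest⟩⟩⟩⟩⟩⟩
  · exact ⟨by decide, by decide⟩
  · have ha := hp a (by simp)
    simp only [List.sum_cons, List.sum_nil] at hj ⊢
    have hA : a ≤ 5 := by omega
    interval_cases a <;> exact ⟨by decide, by decide⟩
  · have ha := hp a (by simp); have hb := hp b (by simp)
    have hab : a ≤ b := by simp [List.pairwise_cons] at hs; omega
    simp only [List.sum_cons, List.sum_nil] at hj ⊢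
    have hA : a ≤ 5 := by omega
    have hB : b ≤ 5 := by omega
    interval_cases a <;> interval_cases b <;> first | (exfalso; omega) | exact ⟨by decide, by decide⟩
  · have ha := hp a (by simp); have hb := hp b (by simp); have hc := hp c (by simp)
    have hmono : a ≤ b ∧ b ≤ c := by simp [List.pairwise_cons] at hs; omega
    obtain ⟨hab, hbc⟩ := hmono
    simp only [List.sum_cons, List.sum_nil] at hj ⊢
    have hA : a ≤ 5 := by omega
    have hB : b ≤ 5 := by omega
    have hC : c ≤ 5 := by omega
    interval_cases a <;> interval_cases b <;> interval_cases c <;> first | (exfalso; omega) | exact ⟨by decide, by decide⟩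
  · have ha := hp a (by simp); have hb := hp b (by simp)
    have hc := hp c (by simp); have hd := hp d (by simp)
    have hmono : a ≤ b ∧ b ≤ c ∧ c ≤ d := by simp [List.pairwise_cons] at hs; omega
    obtain ⟨hab, hbc, hcd⟩ := hmono
    simp only [List.sum_cons, List.sum_nil] at hj ⊢
    have hA : a ≤ 5 := by omega
    have hB : b ≤ 5 := by omega
    have hC : c ≤ 5 := by omega
    have hD : d ≤ 5 := by omega
    interval_cases a <;> interval_cases b <;> interval_cases c <;> interval_cases d <;>
      first | (exfalso; omega) | exact ⟨by decide, by decide⟩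
  · have ha := hp a (by simp); have hb := hp b (by simp); have hc := hp c (by simp)
    have hd := hp d (by simp); have he := hp e (by simp)
    have hmono : a ≤ b ∧ b ≤ c ∧ c ≤ d ∧ d ≤ e := by simp [List.pairwise_cons] at hs; omega
    obtain ⟨hab, hbc, hcd, hde⟩ := hmono
    simp only [List.sum_cons, List.sum_nil] at hj ⊢
    have hA : a ≤ 5 := by omega
    have hB : b ≤ 5 := by omega
    have hC : c ≤ 5 := by omega
    have hD : d ≤ 5 := by omega
    have hE : e ≤ 5 := by omega
    interval_cases a <;> interval_cases b <;> interval_cases c <;> interval_cases d <;>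
      interval_cases e <;> first | (exfalso; omega) | exact ⟨by decide, by decide⟩
  · exfalso
    have h1 := hp a (by simp); have h2 := hp b (by simp); have h3 := hp c (by simp)
    have h4 := hp d (by simp); have h5 := hp e (by simp); have h6 := hp f (by simp)
    have hr : (0:Int) ≤ rest.sum := by
      have := len_le_sum_of_one_le rest (fun x hx => hp x (by simp [hx]))
      have : (0:Int) ≤ (rest.length : Int) := by positivity
      omega
    simp only [List.sum_cons] at hj
    omega

-- per-character: ordering.index agrees with the STRENGTH dict on the 13 ranks
lemma strength_agree (c : Char) (hc : c ∈ orderingA) :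
    (PySem.List.index? orderingA c).map (fun n => (n : Int)) = strengthB.get? c ∧
    (strengthB.get? c).isSome = true := by
  fin_cases hc <;> exact ⟨by decide, by decide⟩

-- Option.mapM respects pointwise-equal functions
lemma mapM_option_congr {α β : Type} (xs : List α) (f g : α → Option β)
    (h : ∀ x ∈ xs, f x = g x) : xs.mapM f = xs.mapM g := by
  induction xs with
  | nil => rfl
  | cons a t ih =>
    simp only [List.mapM_cons, h a (by simp), ih (fun x hx => h x (by simp [hx]))]

-- Option.mapM of an everywhere-some function is some
lemma mapM_option_isSome {α β : Type} (xs : List α) (f : α → Option β)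
    (h : ∀ x ∈ xs, (f x).isSome = true) : (xs.mapM f).isSome = true := by
  induction xs with
  | nil => rfl
  | cons a t ih =>
    simp only [List.mapM_cons]
    obtain ⟨v, hv⟩ := Option.isSome_iff_exists.mp (h a (by simp))
    obtain ⟨w, hw⟩ := Option.isSome_iff_exists.mp (ih (fun x hx => h x (by simp [hx])))
    simp [hv, hw]

-- per-hand: A's key and B's key coincide (and neither raises) on a hand A accepts
lemma key_agree (cards : String) (h5 : (cards.toList.filter (fun c => c != 'J')).length ≤ 5)
    (hc : ∀ c ∈ cards.toList, c ∈ orderingA) :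
    keyA cards = keyB cards ∧ (keyA cards).isSome = true := by
  have hvals : (PySem.Dict.counter (cards.toList.filter (fun c => c != 'J'))).values
      = (PySem.Set.ofList (cards.toList.filter (fun c => c != 'J'))).map
          (fun k => ((cards.toList.filter (fun c => c != 'J')).count k : Int)) := by
    simp [PySem.Dict.values, PySem.Dict.items_counter, List.map_map]
  set l := cards.toList with hl
  set m := l.filter (fun c => c != 'J') with hm
  set S := PySem.List.sorted ((PySem.Dict.counter m).values) (fun x => x) false with hS
  have hperm : (PySem.Set.ofList m).Perm m.dedup := by
    rw [List.perm_ext_iff_of_nodup (PySem.Set.nodup_ofList m) m.nodup_dedup]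
    intro a; simp [PySem.Set.mem_ofList]
  have hSsum : S.sum = (m.length : Int) := by
    have h1 : S.sum = ((PySem.Dict.counter m).values).sum :=
      (PySem.List.sorted_perm ((PySem.Dict.counter m).values) (fun x => x) false).sum_eq
    rw [hvals] at h1
    have h2 : ((PySem.Set.ofList m).map (fun k => (m.count k : Int))).sum
        = (m.dedup.map (fun k => (m.count k : Int))).sum := (hperm.map _).sum_eq
    have h3 : (m.dedup.map (fun k => (m.count k : Int))).sum = ((m.dedup.map (fun k => m.count k)).sum : Int) := by
      rw [Nat.cast_list_sum, List.map_map]; rfl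
    have h4 := List.sum_map_count_dedup_eq_length m
    rw [h1, h2, h3, h4]
  have hpos : ∀ x ∈ S, 1 ≤ x := by
    intro x hx
    have hx' : x ∈ (PySem.Dict.counter m).values :=
      (PySem.List.mem_sorted ((PySem.Dict.counter m).values) (fun y => y) false x).mp hx
    rw [hvals] at hx'
    obtain ⟨k, hk, rfl⟩ := List.mem_map.mp hx'
    have hkm : k ∈ m := (PySem.Set.mem_ofList m k).mp hk
    have := List.count_pos_iff.mpr hkm
    exact_mod_cast this
  have hspw : S.Pairwise (· ≤ ·) := by
    simpa using PySem.List.sorted_pairwise ((PySem.Dict.counter m).values) (fun x => x)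
  have hm5 : m.length ≤ 5 := by rw [hm]; exact h5
  have hjnn : (0:Int) ≤ 5 - S.sum := by rw [hSsum]; omega
  obtain ⟨hkind, hsomeA⟩ := kind_agree S (5 - S.sum) hpos hspw hjnn (by omega)
  have hstr : l.mapM (fun c => (PySem.List.index? orderingA c).map (fun n => (n : Int)))
      = l.mapM (fun c => strengthB.get? c) :=
    mapM_option_congr l _ _ (fun c hcm => (strength_agree c (hc c hcm)).1)
  have hstrSome : (l.mapM (fun c => (PySem.List.index? orderingA c).map (fun n => (n : Int)))).isSome = true := by
    apply mapM_option_isSome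
    intro c hcm
    rw [(strength_agree c (hc c hcm)).1]
    exact (strength_agree c (hc c hcm)).2
  simp only [keyA, keyB]
  rw [← hl, ← hm, ← hS, hkind, hstr]
  constructor
  · rfl
  · rw [← hkind, ← hstr]
    obtain ⟨k0, hk0⟩ := Option.isSome_iff_exists.mp hsomeA
    obtain ⟨st, hst⟩ := Option.isSome_iff_exists.mp hstrSome
    rw [hk0, hst]
    rfl

-- ---- the rank-counting machinery: enumerate-sum over a stable sort = counted ranks ----

-- A's weighted enumerate-sum, with a general start index
def eSum {α : Type} (w : α → Int) (s : Int) (zs : List α) : Int :=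
  ((PySem.List.enumerate zs s).map (fun p => p.1 * w p.2)).sum

-- B's one-pass step, abstracted over the key table ks
def cStep {α : Type} (f : α → List Int) (w : α → Int) (ks : List (List Int)) :
    (List (List Int) × Int) → α → (List (List Int) × Int) := fun st x =>
  (st.1 ++ [f x],
   st.2 + (1 + ((ks.countP (fun kk => decide (kk < f x)) : Int))
             + ((st.1.countP (fun kk => decide (kk = f x)) : Int))) * w x)

lemma eSum_cons {α : Type} (w : α → Int) (s : Int) (x : α) (zs : List α) :
    eSum w s (x :: zs) = s * w x + eSum w (s + 1) zs := by
  simp [eSum, PySem.List.enumerate_cons]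

lemma eSum_shift {α : Type} (w : α → Int) (s : Int) (zs : List α) :
    eSum w (s + 1) zs = eSum w s zs + (zs.map w).sum := by
  induction zs generalizing s with
  | nil => simp [eSum]
  | cons a t ih =>
    rw [eSum_cons, eSum_cons, ih (s + 1), ih s]
    simp only [List.map_cons, List.sum_cons]
    ring

lemma eSum_insertBy {α : Type} (f : α → List Int) (w : α → Int) (x : α) (zs : List α)
    (hs : zs.Pairwise (fun a b => f a ≤ f b)) (s : Int) :
    eSum w s (PySem.List.insertBy (fun a b => decide (f a < f b)) x zs)
      = eSum w s zs + (s + (zs.countP (fun y => decide (f y ≤ f x)) : Int)) * w x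
        + ((zs.filter (fun y => decide (f x < f y))).map w).sum := by
  induction zs generalizing s with
  | nil => simp [PySem.List.insertBy, eSum]
  | cons a t ih =>
    by_cases hxa : f x < f a
    · have hall : ∀ y ∈ a :: t, f x < f y := by
        intro y hy
        rcases List.mem_cons.mp hy with rfl | hyt
        · exact hxa
        · exact lt_of_lt_of_le hxa ((List.pairwise_cons.mp hs).1 y hyt)
      have hcount : (a :: t).countP (fun y => decide (f y ≤ f x)) = 0 := by
        rw [List.countP_eq_zero]
        intro y hy
        simp [not_le.mpr (hall y hy)]
      have hfilter : (a :: t).filter (fun y => decide (f x < f y)) = a :: t := by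
        rw [List.filter_eq_self]
        intro y hy
        simp [hall y hy]
      simp only [PySem.List.insertBy, decide_eq_true_eq, if_pos hxa]
      rw [eSum_cons, eSum_shift, hcount, hfilter]
      push_cast
      ring
    · have hax : f a ≤ f x := not_lt.mp hxa
      simp only [PySem.List.insertBy, decide_eq_true_eq, if_neg hxa]
      rw [eSum_cons, ih (List.Pairwise.of_cons hs) (s + 1), eSum_cons]
      have hcount : ((a :: t).countP (fun y => decide (f y ≤ f x)) : Int)
          = 1 + (t.countP (fun y => decide (f y ≤ f x)) : Int) := by
        rw [List.countP_cons]
        simp [hax]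
        ring
      have hfilter : (a :: t).filter (fun y => decide (f x < f y))
          = t.filter (fun y => decide (f x < f y)) := by
        rw [List.filter_cons_of_neg]
        simp [hxa]
      rw [hcount, hfilter]
      ring

-- the seen-accumulator of the counting fold is just the keys of the processed prefix
lemma cFold_fst {α : Type} (f : α → List Int) (w : α → Int) (ks : List (List Int))
    (zs : List α) (seen : List (List Int)) (t : Int) :
    (zs.foldl (cStep f w ks) (seen, t)).1 = seen ++ zs.map f := by
  induction zs generalizing seen t with
  | nil => simp
  | cons a zt ih => simp [cStep, ih]

-- the running total is additive in its starting value
lemma cFold_add {α : Type} (f : α → List Int) (w : α → Int) (ks : List (List Int))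
    (zs : List α) (seen : List (List Int)) (t u : Int) :
    (zs.foldl (cStep f w ks) (seen, t + u)).2 = (zs.foldl (cStep f w ks) (seen, t)).2 + u := by
  induction zs generalizing seen t with
  | nil => rfl
  | cons a zt ih =>
    simp only [List.foldl_cons, cStep]
    rw [show t + u + (1 + ((ks.countP (fun kk => decide (kk < f a)) : Int))
          + ((seen.countP (fun kk => decide (kk = f a)) : Int))) * w a
        = t + (1 + ((ks.countP (fun kk => decide (kk < f a)) : Int))
          + ((seen.countP (fun kk => decide (kk = f a)) : Int))) * w a + u by ring]
    exact ih _ _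

-- extending the key table by one key adds its weight to every strictly larger hand
lemma cFold_ks_append {α : Type} (f : α → List Int) (w : α → Int) (ks : List (List Int))
    (k' : List Int) (zs : List α) (seen : List (List Int)) (t : Int) :
    (zs.foldl (cStep f w (ks ++ [k'])) (seen, t)).2
      = (zs.foldl (cStep f w ks) (seen, t)).2
        + ((zs.filter (fun y => decide (k' < f y))).map w).sum := by
  induction zs generalizing seen t with
  | nil => simp
  | cons a zt ih =>
    simp only [List.foldl_cons, cStep, List.countP_append]
    by_cases hk : k' < f a
    · have hc : ([k'].countP (fun kk => decide (kk < f a)) : Int) = 1 := by simp [hk]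
      rw [List.filter_cons_of_pos (by simp [hk]), List.map_cons, List.sum_cons]
      push_cast [hc]
      rw [show t + (1 + (((ks.countP (fun kk => decide (kk < f a)) : Int)) + 1)
            + ((seen.countP (fun kk => decide (kk = f a)) : Int))) * w a
          = t + (1 + ((ks.countP (fun kk => decide (kk < f a)) : Int))
            + ((seen.countP (fun kk => decide (kk = f a)) : Int))) * w a + w a by ring]
      rw [ih _ _, cFold_add]
      ring
    · have hc : [k'].countP (fun kk => decide (kk < f a)) = 0 := by simp [hk]
      rw [List.filter_cons_of_neg (by simp [hk])]
      push_cast [hc]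
      rw [show ((ks.countP (fun kk => decide (kk < f a)) : Int)) + 0
          = ((ks.countP (fun kk => decide (kk < f a)) : Int)) by ring]
      rw [ih _ _]

-- splitting ≤ into < and = under countP
lemma countP_le_split {α : Type} (f : α → List Int) (x : α) (zs : List α) :
    zs.countP (fun y => decide (f y ≤ f x))
      = zs.countP (fun y => decide (f y < f x)) + zs.countP (fun y => decide (f y = f x)) := by
  induction zs with
  | nil => rfl
  | cons a t ih =>
    simp only [List.countP_cons, ih]
    rcases lt_trichotomy (f a) (f x) with h | h | h
    · simp [le_of_lt h, ne_of_lt h, h]; omega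
    · simp [h]; omega
    · simp [not_le.mpr h, not_lt.mpr (le_of_lt h), ne_of_gt h]

-- the main theorem: the enumerate-sum over the stable sort equals the counted-rank sum
lemma counting_eq {α : Type} (f : α → List Int) (w : α → Int) (zs : List α) :
    eSum w 1 (PySem.List.sorted zs f false)
      = (zs.foldl (cStep f w (zs.map f)) (([], 0) : List (List Int) × Int)).2 := by
  induction zs using List.reverseRecOn with
  | nil => simp [eSum, PySem.List.sorted]
  | append_singleton zs x ih =>
    have hsorted : (PySem.List.sorted zs f false).Pairwise (fun a b => f a ≤ f b) := by
      have h0 := PySem.List.sorted_pairwise (κ := List Int) zs f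
      have heq : (@PySem.List.sorted α (List Int) List.instLinearOrder.toLT
            LinearOrder.toDecidableLT zs f false)
          = PySem.List.sorted zs f false := by congr 1
      rwa [heq] at h0
    have hperm := PySem.List.sorted_perm zs f false
    -- LHS: peel off the final insert
    have hL : PySem.List.sorted (zs ++ [x]) f false
        = PySem.List.insertBy (fun a b => decide (f a < f b)) x (PySem.List.sorted zs f false) := by
      rw [PySem.List.sorted_eq_foldl_insertBy, PySem.List.sorted_eq_foldl_insertBy,
        List.foldl_append, List.foldl_cons, List.foldl_nil]
    rw [hL, eSum_insertBy f w x _ hsorted 1, ih,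
      hperm.countP_eq, ((hperm.filter _).map w).sum_eq]
    -- RHS: peel off the final fold step
    simp only [List.map_append, List.map_cons, List.map_nil]
    rw [List.foldl_append, List.foldl_cons, List.foldl_nil]
    have hfst := cFold_fst f w (zs.map f ++ [f x]) zs [] 0
    simp only [cStep, hfst, List.nil_append]
    rw [cFold_ks_append f w (zs.map f) (f x) zs [] 0]
    have hceq : (zs.map f).countP (fun kk => decide (kk = f x))
        = zs.countP (fun y => decide (f y = f x)) := List.countP_map ..
    have hclt : ((zs.map f ++ [f x]).countP (fun kk => decide (kk < f x)) : Int)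
        = (zs.countP (fun y => decide (f y < f x)) : Int) := by
      rw [List.countP_append, List.countP_map]
      simp
      rfl
    rw [hclt, hceq, countP_le_split]
    push_cast
    ring

-- counting_eq with eSum/cStep unfolded, shaped like the ports
lemma counting_eq' {α : Type} (f : α → List Int) (w : α → Int) (zs : List α) :
    ((PySem.List.enumerate (PySem.List.sorted zs f false) 1).map (fun p => p.1 * w p.2)).sum
      = (zs.foldl (fun st x => (st.1 ++ [f x],
           st.2 + (1 + (((zs.map f).countP (fun kk => decide (kk < f x))) : Int)
                     + ((st.1.countP (fun kk => decide (kk = f x))) : Int)) * w x))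
          (([], 0) : List (List Int) × Int)).2 := counting_eq f w zs

-- ===== VERDICT (by name: the statement is the Claim_ definition above) =====
set_option maxHeartbeats 1000000 in
theorem part_two_spec : Claim_equal_part_two := by
  intro hands _hdom hpre
  unfold Spec_part_two part_two part_two_alt
  have hpre' := List.all_eq_true.mp hpre
  have hkeys : ∀ h ∈ hands, keyA h.1 = keyB h.1 ∧ (keyA h.1).isSome = true := by
    intro h hh
    have hh' := hpre' h hh
    simp only [Bool.and_eq_true, decide_eq_true_eq, List.all_eq_true] at hh'
    exact key_agree h.1 hh'.1.1 (fun c hcm => by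
      have := hh'.1.2 c hcm
      simpa [List.contains_iff_mem] using this)
  have hbid : ∀ h ∈ hands, (PySem.Int.ofStr? h.2).isSome = true := by
    intro h hh
    have hh' := hpre' h hh
    simp only [Bool.and_eq_true] at hh'
    exact hh'.2
  have hgA : hands.all (fun h => (keyA h.1).isSome && (PySem.Int.ofStr? h.2).isSome) = true :=
    List.all_eq_true.mpr (fun h hh => by simp [(hkeys h hh).2, hbid h hh])
  have hgB : hands.all (fun h => (keyB h.1).isSome && (PySem.Int.ofStr? h.2).isSome) = true :=
    List.all_eq_true.mpr (fun h hh => by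
      simp [← (hkeys h hh).1, (hkeys h hh).2, hbid h hh])
  rw [if_pos hgA, if_pos hgB]
  -- B's key list is A's key list
  have hks : hands.map (fun h => (keyB h.1).getD []) = hands.map (fun h => (keyA h.1).getD []) :=
    List.map_congr_left (fun h hh => by rw [(hkeys h hh).1])
  dsimp only
  -- turn B's zip-fold into the abstract counting fold
  rw [hks, ← List.map_prod_left_eq_zip, List.foldl_map]
  dsimp only
  rw [counting_eq' (fun h => (keyA h.1).getD []) (fun h => (PySem.Int.ofStr? h.2).getD 0) hands]
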